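-- pv_equiv track=rewrite | github.com/wilmurillo-ai/Design-Assistant | .skills/openclaw-skills/skills/fish1981bimmer/sql-splitter/scripts/split_sql.py | find_semicolon_end
-- ===== SOURCE A (Python) =====
-- def _skip_quoted(sql: str, start: int, bound: int) -> int:
--     """跳过引号内容，返回引号结束后的位置"""
--     quote = sql[start]
--     i = start + 1
--     while i < bound:
--         if sql[i] == quote:
--             if i + 1 < bound and sql[i + 1] == quote:
--                 i += 2
--                 continue
--             return i + 1
--         i += 1
--     return i
--
-- def find_semicolon_end(sql: str, start: int, bound: int) -> int:
--     """简单语句：找到分号后返回"""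
--     i = start
--     while i < bound:
--         if sql[i] in ("'", '"'):
--             i = _skip_quoted(sql, i, bound)
--             continue
--         if sql[i] == '-' and i + 1 < bound and sql[i + 1] == '-':
--             while i < bound and sql[i] != '\n':
--                 i += 1
--             continue
--         if sql[i] == '/' and i + 1 < bound and sql[i + 1] == '*':
--             i += 2
--             while i + 1 < bound and not (sql[i] == '*' and sql[i + 1] == '/'):
--                 i += 1
--             i += 2
--             continue
--         if sql[i] == ';':
--             return i + 1
--         i += 1
--     return bound
-- ===== SOURCE B (Python) =====
-- # Single-pass character state machine (NORMAL / quote / line comment / block comment),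
-- # helper inlined; same return value as A on in-range scans.
-- NORMAL, IN_QUOTE, IN_LINE, IN_BLOCK = 0, 1, 2, 3
--
-- def find_semicolon_end(sql: str, start: int, bound: int) -> int:
--     state = NORMAL
--     quote = ''
--     i = start
--     while i < bound:
--         c = sql[i]
--         if state == NORMAL:
--             if c == ';':
--                 return i + 1
--             if c in ("'", '"'):
--                 state, quote = IN_QUOTE, c
--                 i += 1
--             elif c == '-' and i + 1 < bound and sql[i + 1] == '-':
--                 state = IN_LINE
--                 i += 1
--             elif c == '/' and i + 1 < bound and sql[i + 1] == '*':
--                 state = IN_BLOCK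
--                 i += 2
--             else:
--                 i += 1
--         elif state == IN_QUOTE:
--             if c == quote:
--                 if i + 1 < bound and sql[i + 1] == quote:
--                     i += 2
--                 else:
--                     state = NORMAL
--                     i += 1
--             else:
--                 i += 1
--         elif state == IN_LINE:
--             if c == '\n':
--                 state = NORMAL
--             i += 1
--         else:  # IN_BLOCK
--             if c == '*' and i + 1 < bound and sql[i + 1] == '/':
--                 state = NORMAL
--                 i += 2
--             else:
--                 i += 1
--     return bound
-- ===== Notes on version B (the rewrite author's own statement) =====
-- stated objective: alternative
-- what changed: Replaced A's outer loop with nested skip-loops and a _skip_quoted helper by a single flat one-character-per-step state machine (NORMAL/IN_QUOTE/IN_LINE/IN_BLOCK) with the helper inlined as a state.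
-- outside the precondition, e.g. on find_semicolon_end(';', 0, 5): A returns 1, B returns 1; on find_semicolon_end('ab', 0, 5): A raises IndexError, B raises IndexError
import Mathlib
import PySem

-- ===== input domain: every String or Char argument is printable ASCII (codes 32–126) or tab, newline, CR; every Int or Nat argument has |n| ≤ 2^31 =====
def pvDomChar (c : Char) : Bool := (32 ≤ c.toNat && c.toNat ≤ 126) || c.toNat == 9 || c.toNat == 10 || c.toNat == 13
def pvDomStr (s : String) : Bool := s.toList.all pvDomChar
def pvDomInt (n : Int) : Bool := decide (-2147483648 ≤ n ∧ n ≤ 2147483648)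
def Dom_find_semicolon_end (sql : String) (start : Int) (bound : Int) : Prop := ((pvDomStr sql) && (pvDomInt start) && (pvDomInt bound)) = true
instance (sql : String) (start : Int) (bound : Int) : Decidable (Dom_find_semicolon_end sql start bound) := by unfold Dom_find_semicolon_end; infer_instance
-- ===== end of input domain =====

-- B replaces A's nested skip-loops and _skip_quoted helper by one flat per-character state machine; same cost, different decomposition.
-- ===== PORT A =====
-- _skip_quoted's inner while (quote already read at `start`, scanning from start+1; caller passes i+1)
def pvSkipQuoted (cs : List Char) (q : Char) (bound : Int) (i : Int) : Int :=
  if i < bound then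
    match PySem.List.pyGet? cs i with
    | none => i  -- Python raises IndexError here (outside Pre_)
    | some c =>
      if c = q then
        if i + 1 < bound ∧ PySem.List.pyGet? cs (i + 1) = some q then
          pvSkipQuoted cs q bound (i + 2)
        else i + 1
      else pvSkipQuoted cs q bound (i + 1)
  else i
termination_by (bound - i).toNat
decreasing_by all_goals omega

-- A's inner line-comment while: `while i < bound and sql[i] != '\n': i += 1`
def pvLineSkip (cs : List Char) (bound : Int) (i : Int) : Int :=
  if i < bound then
    match PySem.List.pyGet? cs i with
    | none => i  -- Python raises IndexError here (outside Pre_)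
    | some c => if c = '\n' then i else pvLineSkip cs bound (i + 1)
  else i
termination_by (bound - i).toNat
decreasing_by omega

-- A's inner block-comment while plus the trailing `i += 2`
def pvBlockSkip (cs : List Char) (bound : Int) (i : Int) : Int :=
  if i + 1 < bound then
    match PySem.List.pyGet? cs i, PySem.List.pyGet? cs (i + 1) with
    | some c, some d =>
      if c = '*' ∧ d = '/' then i + 2 else pvBlockSkip cs bound (i + 1)
    | _, _ => i + 2  -- Python raises IndexError here (outside Pre_)
  else i + 2
termination_by (bound - i).toNat
decreasing_by omega

-- A's outer while, fuel-recursive; each iteration strictly advances i, so the initial fuel always suffices inside Pre_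
def pvAMain : Nat → List Char → Int → Int → Int
  | 0, _, bound, _ => bound
  | f + 1, cs, bound, i =>
    if i < bound then
      match PySem.List.pyGet? cs i with
      | none => bound  -- Python raises IndexError here (outside Pre_)
      | some c =>
        if c = '\'' ∨ c = '"' then pvAMain f cs bound (pvSkipQuoted cs c bound (i + 1))
        else if c = '-' ∧ i + 1 < bound ∧ PySem.List.pyGet? cs (i + 1) = some '-' then
          pvAMain f cs bound (pvLineSkip cs bound i)
        else if c = '/' ∧ i + 1 < bound ∧ PySem.List.pyGet? cs (i + 1) = some '*' then
          pvAMain f cs bound (pvBlockSkip cs bound (i + 2))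
        else if c = ';' then i + 1
        else pvAMain f cs bound (i + 1)
    else bound

def find_semicolon_end (sql : String) (start : Int) (bound : Int) : Int :=
  pvAMain ((bound - start).toNat + 1) sql.toList bound start

-- ===== PORT B =====
inductive PvState : Type
  | normal : PvState
  | inQ : Char → PvState
  | lineC : PvState
  | blockC : PvState
deriving DecidableEq, Repr

-- B's single while loop: one character per step, explicit state
def pvBMain : Nat → List Char → Int → PvState → Int → Int
  | 0, _, bound, _, _ => bound
  | f + 1, cs, bound, st, i =>
    if i < bound then
      match PySem.List.pyGet? cs i with
      | none => bound  -- Python raises IndexError here (outside Pre_)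
      | some c =>
        match st with
        | .normal =>
          if c = ';' then i + 1
          else if c = '\'' ∨ c = '"' then pvBMain f cs bound (.inQ c) (i + 1)
          else if c = '-' ∧ i + 1 < bound ∧ PySem.List.pyGet? cs (i + 1) = some '-' then
            pvBMain f cs bound .lineC (i + 1)
          else if c = '/' ∧ i + 1 < bound ∧ PySem.List.pyGet? cs (i + 1) = some '*' then
            pvBMain f cs bound .blockC (i + 2)
          else pvBMain f cs bound .normal (i + 1)
        | .inQ q =>
          if c = q then
            if i + 1 < bound ∧ PySem.List.pyGet? cs (i + 1) = some q then
              pvBMain f cs bound (.inQ q) (i + 2)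
            else pvBMain f cs bound .normal (i + 1)
          else pvBMain f cs bound (.inQ q) (i + 1)
        | .lineC =>
          if c = '\n' then pvBMain f cs bound .normal (i + 1)
          else pvBMain f cs bound .lineC (i + 1)
        | .blockC =>
          if c = '*' ∧ i + 1 < bound ∧ PySem.List.pyGet? cs (i + 1) = some '/' then
            pvBMain f cs bound .normal (i + 2)
          else pvBMain f cs bound .blockC (i + 1)
    else bound

def find_semicolon_end_alt (sql : String) (start : Int) (bound : Int) : Int :=
  pvBMain ((bound - start).toNat + 1) sql.toList bound .normal start

-- ===== PRECONDITION & SPEC =====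
-- Pre_ excludes scan windows reaching outside the string (negative start below -len, or bound past the
-- end), where A raises IndexError unless an early semicolon cuts the scan short; A's wraparound on
-- negative indices is matched exactly by B, so in-range negative starts stay inside Pre_.
def Pre_find_semicolon_end (sql : String) (start : Int) (bound : Int) : Prop :=
  start < bound → (-(sql.toList.length : Int) ≤ start ∧ bound ≤ (sql.toList.length : Int))
instance (sql : String) (start : Int) (bound : Int) : Decidable (Pre_find_semicolon_end sql start bound) := by
  unfold Pre_find_semicolon_end; infer_instance

def pvWitness_find_semicolon_end : String × Int × Int := ("a';'b;c", 0, 7)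

def Spec_find_semicolon_end (sql : String) (start : Int) (bound : Int) (out : Int) : Prop := out = find_semicolon_end_alt sql start bound
instance (sql : String) (start : Int) (bound : Int) (out : Int) : Decidable (Spec_find_semicolon_end sql start bound out) := by unfold Spec_find_semicolon_end; infer_instance

-- ===== CLAIM (what is proved, stated in full; the proofs are below) =====
def Claim_equal_find_semicolon_end : Prop := ∀ (sql : String) (start : Int) (bound : Int), Dom_find_semicolon_end sql start bound → Pre_find_semicolon_end sql start bound → Spec_find_semicolon_end sql start bound (find_semicolon_end sql start bound)

-- ===== LEMMAS AND PROOFS =====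

theorem pv_witness_ok :
    Dom_find_semicolon_end (pvWitness_find_semicolon_end.1) (pvWitness_find_semicolon_end.2.1) (pvWitness_find_semicolon_end.2.2) ∧
    Pre_find_semicolon_end (pvWitness_find_semicolon_end.1) (pvWitness_find_semicolon_end.2.1) (pvWitness_find_semicolon_end.2.2) := by
  decide

theorem pvSkipQuoted_ge (cs : List Char) (q : Char) (bound i : Int) :
    i ≤ pvSkipQuoted cs q bound i := by
  fun_induction pvSkipQuoted cs q bound i <;> omega

theorem pvLineSkip_ge (cs : List Char) (bound i : Int) :
    i ≤ pvLineSkip cs bound i := by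
  fun_induction pvLineSkip cs bound i <;> omega

theorem pvBlockSkip_ge (cs : List Char) (bound i : Int) :
    i + 2 ≤ pvBlockSkip cs bound i := by
  fun_induction pvBlockSkip cs bound i <;> omega

theorem pvAMain_stop (f : Nat) (cs : List Char) (bound i : Int) (h : ¬ i < bound) :
    pvAMain f cs bound i = bound := by
  cases f <;> simp [pvAMain, h]

theorem pvBMain_stop (f : Nat) (cs : List Char) (bound : Int) (st : PvState) (i : Int)
    (h : ¬ i < bound) : pvBMain f cs bound st i = bound := by
  cases f <;> simp [pvBMain, h]

theorem pv_get_some (cs : List Char) (i : Int)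
    (h1 : -(cs.length : Int) ≤ i) (h2 : i < (cs.length : Int)) :
    ∃ c, PySem.List.pyGet? cs i = some c := by
  cases h : PySem.List.pyGet? cs i with
  | some c => exact ⟨c, rfl⟩
  | none =>
    rw [PySem.List.pyGet?_eq_none_iff, PySem.Raise.InRange] at h
    omega

theorem pvAMain_irrel (cs : List Char) (bound : Int) :
    ∀ f g i, (bound - i).toNat ≤ f → (bound - i).toNat ≤ g →
      pvAMain f cs bound i = pvAMain g cs bound i := by
  intro f
  induction f with
  | zero =>
    intro g i hf _
    rw [pvAMain_stop 0 cs bound i (by omega), pvAMain_stop g cs bound i (by omega)]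
  | succ f ih =>
    intro g i hf hg
    by_cases hi : i < bound
    · cases g with
      | zero => omega
      | succ g =>
        rw [pvAMain, pvAMain]
        simp only [hi, if_true]
        cases h : PySem.List.pyGet? cs i with
        | none => rfl
        | some c =>
          dsimp only
          split_ifs with h1 h2 h3 h4
          · have := pvSkipQuoted_ge cs c bound (i + 1)
            exact ih g (pvSkipQuoted cs c bound (i + 1)) (by omega) (by omega)
          · have h5 : pvLineSkip cs bound i = pvLineSkip cs bound (i + 1) := by
              rw [pvLineSkip]
              simp [hi, h, h2.1]
            have := pvLineSkip_ge cs bound (i + 1)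
            rw [h5]
            exact ih g _ (by omega) (by omega)
          · have := pvBlockSkip_ge cs bound (i + 2)
            exact ih g _ (by omega) (by omega)
          · rfl
          · exact ih g (i + 1) (by omega) (by omega)
    · rw [pvAMain_stop _ cs bound i hi, pvAMain_stop _ cs bound i hi]

theorem pvBMain_irrel (cs : List Char) (bound : Int) :
    ∀ f g st i, (bound - i).toNat ≤ f → (bound - i).toNat ≤ g →
      pvBMain f cs bound st i = pvBMain g cs bound st i := by
  intro f
  induction f with
  | zero =>
    intro g st i hf _
    rw [pvBMain_stop 0 cs bound st i (by omega), pvBMain_stop g cs bound st i (by omega)]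
  | succ f ih =>
    intro g st i hf hg
    by_cases hi : i < bound
    · cases g with
      | zero => omega
      | succ g =>
        rw [pvBMain, pvBMain]
        simp only [hi, if_true]
        cases h : PySem.List.pyGet? cs i with
        | none => rfl
        | some c =>
          cases st with
          | normal =>
            dsimp only
            split_ifs with h1 h2 h3 h4
            · rfl
            · exact ih g _ (i + 1) (by omega) (by omega)
            · exact ih g _ (i + 1) (by omega) (by omega)
            · exact ih g _ (i + 2) (by omega) (by omega)
            · exact ih g _ (i + 1) (by omega) (by omega)
          | inQ q =>
            dsimp only
            split_ifs with h1 h2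
            · exact ih g _ (i + 2) (by omega) (by omega)
            · exact ih g _ (i + 1) (by omega) (by omega)
            · exact ih g _ (i + 1) (by omega) (by omega)
          | lineC =>
            dsimp only
            split_ifs with h1
            · exact ih g _ (i + 1) (by omega) (by omega)
            · exact ih g _ (i + 1) (by omega) (by omega)
          | blockC =>
            dsimp only
            split_ifs with h1
            · exact ih g _ (i + 2) (by omega) (by omega)
            · exact ih g _ (i + 1) (by omega) (by omega)
    · rw [pvBMain_stop _ cs bound st i hi, pvBMain_stop _ cs bound st i hi]

-- run A's outer loop / B's loop with canonical (always sufficient) fuel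
def pvARun (cs : List Char) (bound i : Int) : Int :=
  pvAMain ((bound - i).toNat + 1) cs bound i

def pvBRun (cs : List Char) (bound : Int) (st : PvState) (i : Int) : Int :=
  pvBMain ((bound - i).toNat + 1) cs bound st i

theorem pvARun_eq (f : Nat) (cs : List Char) (bound i : Int) (h : (bound - i).toNat ≤ f) :
    pvAMain f cs bound i = pvARun cs bound i :=
  pvAMain_irrel cs bound f _ i h (by omega)

theorem pvBRun_eq (f : Nat) (cs : List Char) (bound : Int) (st : PvState) (i : Int)
    (h : (bound - i).toNat ≤ f) : pvBMain f cs bound st i = pvBRun cs bound st i :=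
  pvBMain_irrel cs bound f _ st i h (by omega)

theorem pvARun_stop (cs : List Char) (bound i : Int) (h : ¬ i < bound) :
    pvARun cs bound i = bound := pvAMain_stop _ cs bound i h

theorem pvBRun_stop (cs : List Char) (bound : Int) (st : PvState) (i : Int) (h : ¬ i < bound) :
    pvBRun cs bound st i = bound := pvBMain_stop _ cs bound st i h

-- the four per-state statements when the window is already exhausted
theorem pv_stop_all (cs : List Char) (bound i : Int) (hi : ¬ i < bound) :
    (pvARun cs bound i = pvBRun cs bound .normal i) ∧
    (∀ q, pvARun cs bound (pvSkipQuoted cs q bound i) = pvBRun cs bound (.inQ q) i) ∧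
    (pvARun cs bound (pvLineSkip cs bound i) = pvBRun cs bound .lineC i) ∧
    (pvARun cs bound (pvBlockSkip cs bound i) = pvBRun cs bound .blockC i) := by
  refine ⟨?_, ?_, ?_, ?_⟩
  · rw [pvARun_stop cs bound i hi, pvBRun_stop cs bound _ i hi]
  · intro q
    rw [pvSkipQuoted, if_neg hi, pvARun_stop cs bound i hi, pvBRun_stop cs bound _ i hi]
  · rw [pvLineSkip, if_neg hi, pvARun_stop cs bound i hi, pvBRun_stop cs bound _ i hi]
  · rw [pvBlockSkip, if_neg (by omega : ¬ i + 1 < bound),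
      pvARun_stop cs bound _ (by omega), pvBRun_stop cs bound _ i hi]

-- Main bisimulation: A's loop with each of its helper invocations equals B's state machine, by
-- strong induction on the remaining window, simultaneously for the four states.
theorem pv_main (cs : List Char) (bound : Int) (hb : bound ≤ (cs.length : Int)) :
    ∀ k : Nat, ∀ i : Int, (bound - i).toNat ≤ k → -(cs.length : Int) ≤ i →
      (pvARun cs bound i = pvBRun cs bound .normal i) ∧
      (∀ q, pvARun cs bound (pvSkipQuoted cs q bound i) = pvBRun cs bound (.inQ q) i) ∧
      (pvARun cs bound (pvLineSkip cs bound i) = pvBRun cs bound .lineC i) ∧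
      (pvARun cs bound (pvBlockSkip cs bound i) = pvBRun cs bound .blockC i) := by
  intro k
  induction k with
  | zero => intro i hk _; exact pv_stop_all cs bound i (by omega)
  | succ k ih =>
    intro i hk hlo
    by_cases hi : i < bound
    · obtain ⟨c, hc⟩ := pv_get_some cs i hlo (by omega)
      have hA : pvARun cs bound i = pvAMain (k + 1) cs bound i :=
        (pvARun_eq (k + 1) cs bound i hk).symm
      have hB : ∀ st, pvBRun cs bound st i = pvBMain (k + 1) cs bound st i :=
        fun st => (pvBRun_eq (k + 1) cs bound st i hk).symm
      have ih1 := ih (i + 1) (by omega) (by omega)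
      have ih2 := ih (i + 2) (by omega) (by omega)
      refine ⟨?_, ?_, ?_, ?_⟩
      · -- NORMAL state vs A's outer loop head
        rw [hA, hB, pvAMain, pvBMain]
        simp only [hi, if_true, hc]
        by_cases h1 : c = ';'
        · have hq : ¬ (c = '\'' ∨ c = '"') := by subst h1; decide
          have hd : ¬ (c = '-' ∧ i + 1 < bound ∧ PySem.List.pyGet? cs (i + 1) = some '-') := by
            subst h1; simp
          have hs : ¬ (c = '/' ∧ i + 1 < bound ∧ PySem.List.pyGet? cs (i + 1) = some '*') := by
            subst h1; simp
          rw [if_neg hq, if_neg hd, if_neg hs, if_pos h1, if_pos h1]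
        · by_cases h2 : c = '\'' ∨ c = '"'
          · rw [if_pos h2, if_neg h1, if_pos h2,
              pvARun_eq k cs bound _ (by have := pvSkipQuoted_ge cs c bound (i + 1); omega),
              pvBRun_eq k cs bound _ (i + 1) (by omega)]
            exact ih1.2.1 c
          · by_cases h3 : c = '-' ∧ i + 1 < bound ∧ PySem.List.pyGet? cs (i + 1) = some '-'
            · have h5 : pvLineSkip cs bound i = pvLineSkip cs bound (i + 1) := by
                rw [pvLineSkip]
                simp [hi, hc, h3.1]
              rw [if_neg h2, if_pos h3, if_neg h1, if_neg h2, if_pos h3, h5,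
                pvARun_eq k cs bound _ (by have := pvLineSkip_ge cs bound (i + 1); omega),
                pvBRun_eq k cs bound _ (i + 1) (by omega)]
              exact ih1.2.2.1
            · by_cases h4 : c = '/' ∧ i + 1 < bound ∧ PySem.List.pyGet? cs (i + 1) = some '*'
              · rw [if_neg h2, if_neg h3, if_pos h4, if_neg h1, if_neg h2, if_neg h3, if_pos h4,
                  pvARun_eq k cs bound _ (by have := pvBlockSkip_ge cs bound (i + 2); omega),
                  pvBRun_eq k cs bound _ (i + 2) (by omega)]
                exact ih2.2.2.2
              · rw [if_neg h2, if_neg h3, if_neg h4, if_neg h1, if_neg h1, if_neg h2, if_neg h3,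
                  if_neg h4, pvARun_eq k cs bound (i + 1) (by omega),
                  pvBRun_eq k cs bound _ (i + 1) (by omega)]
                exact ih1.1
      · -- quote state vs _skip_quoted
        intro q
        rw [pvSkipQuoted, if_pos hi, hc, hB, pvBMain]
        simp only [hi, if_true, hc]
        by_cases h1 : c = q
        · by_cases h2 : i + 1 < bound ∧ PySem.List.pyGet? cs (i + 1) = some q
          · rw [if_pos h1, if_pos h2, if_pos h1, if_pos h2,
              pvBRun_eq k cs bound _ (i + 2) (by omega)]
            exact ih2.2.1 q
          · rw [if_pos h1, if_neg h2, if_pos h1, if_neg h2,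
              pvBRun_eq k cs bound _ (i + 1) (by omega)]
            exact ih1.1
        · rw [if_neg h1, if_neg h1, pvBRun_eq k cs bound _ (i + 1) (by omega)]
          exact ih1.2.1 q
      · -- line-comment state vs A's inner '--' while
        rw [pvLineSkip, if_pos hi, hc, hB, pvBMain]
        simp only [hi, if_true, hc]
        by_cases h1 : c = '\n'
        · rw [if_pos h1, if_pos h1, pvBRun_eq k cs bound _ (i + 1) (by omega), ← ih1.1, hA,
            pvAMain]
          simp only [hi, if_true, hc]
          have hq : ¬ (c = '\'' ∨ c = '"') := by subst h1; decide
          have hd : ¬ (c = '-' ∧ i + 1 < bound ∧ PySem.List.pyGet? cs (i + 1) = some '-') := by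
            subst h1; simp
          have hs : ¬ (c = '/' ∧ i + 1 < bound ∧ PySem.List.pyGet? cs (i + 1) = some '*') := by
            subst h1; simp
          have hsemi : ¬ c = ';' := by subst h1; decide
          rw [if_neg hq, if_neg hd, if_neg hs, if_neg hsemi,
            pvARun_eq k cs bound (i + 1) (by omega)]
        · rw [if_neg h1, if_neg h1, pvBRun_eq k cs bound _ (i + 1) (by omega)]
          exact ih1.2.2.1
      · -- block-comment state vs A's inner '/* */' while (plus its trailing i += 2)
        rw [pvBlockSkip]
        by_cases hib : i + 1 < bound
        · obtain ⟨d, hd⟩ := pv_get_some cs (i + 1) (by omega) (by omega)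
          rw [if_pos hib, hc, hd, hB, pvBMain]
          simp only [hi, if_true, hc]
          by_cases hm : c = '*' ∧ d = '/'
          · have hmb : c = '*' ∧ i + 1 < bound ∧ PySem.List.pyGet? cs (i + 1) = some '/' :=
              ⟨hm.1, hib, by rw [hd, hm.2]⟩
            rw [if_pos hm, if_pos hmb, pvBRun_eq k cs bound _ (i + 2) (by omega)]
            exact ih2.1
          · have hmb : ¬ (c = '*' ∧ i + 1 < bound ∧ PySem.List.pyGet? cs (i + 1) = some '/') := by
              rw [hd]
              intro ⟨hx, _, hy⟩
              exact hm ⟨hx, by injection hy⟩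
            rw [if_neg hm, if_neg hmb, pvBRun_eq k cs bound _ (i + 1) (by omega)]
            exact ih1.2.2.2
        · rw [if_neg hib, pvARun_stop cs bound _ (by omega), hB, pvBMain]
          simp only [hi, if_true, hc]
          have hmb : ¬ (c = '*' ∧ i + 1 < bound ∧ PySem.List.pyGet? cs (i + 1) = some '/') := by
            intro ⟨_, hx, _⟩; exact hib hx
          rw [if_neg hmb, pvBMain_stop k cs bound _ (i + 1) (by omega)]
    · exact pv_stop_all cs bound i hi

-- ===== VERDICT (by name: the statement is the Claim_ definition above) =====
theorem find_semicolon_end_spec : Claim_equal_find_semicolon_end := by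
  intro sql start bound _ hpre
  show find_semicolon_end sql start bound = find_semicolon_end_alt sql start bound
  unfold find_semicolon_end find_semicolon_end_alt
  by_cases h : start < bound
  · obtain ⟨h1, h2⟩ := hpre h
    rw [pvARun_eq _ _ _ _ (by omega), pvBRun_eq _ _ _ _ _ (by omega)]
    exact (pv_main sql.toList bound h2 ((bound - start).toNat) start (by omega) h1).1
  · rw [pvAMain_stop _ _ _ _ h, pvBMain_stop _ _ _ _ _ h]
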